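-- pv_equiv track=rewrite | github.com/FabianHirjan/News-Fetcher | thirdPythonLabHw.py | ex9
-- ===== SOURCE A (Python) =====
-- def ex9(n):
--     result = []
--     rows = len(n)
--     cols = len(n[0])
--
--     for i in range(rows):
--         for j in range(cols):
--             current_height = n[i][j]
--             for front_row in range(i):
--                 if n[front_row][j] > current_height:
--                     result.append((i, j))
--                     break
--
--     return result
-- ===== SOURCE B (Python) =====
-- def ex9(n):
--     maxes = list(n[0])
--     result = []
--     for i in range(1, len(n)):
--         row = n[i]
--         new_maxes = []
--         for j, (m, h) in enumerate(zip(maxes, row)):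
--             if m > h:
--                 result.append((i, j))
--                 new_maxes.append(m)
--             else:
--                 new_maxes.append(h)
--         maxes = new_maxes
--     return result
-- ===== Notes on version B (the rewrite author's own statement) =====
-- stated objective: faster
-- what changed: Replaced the per-cell scan of all rows above with a single top-to-bottom pass maintaining running column maxima, so each cell is compared to one value.
import Mathlib
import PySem

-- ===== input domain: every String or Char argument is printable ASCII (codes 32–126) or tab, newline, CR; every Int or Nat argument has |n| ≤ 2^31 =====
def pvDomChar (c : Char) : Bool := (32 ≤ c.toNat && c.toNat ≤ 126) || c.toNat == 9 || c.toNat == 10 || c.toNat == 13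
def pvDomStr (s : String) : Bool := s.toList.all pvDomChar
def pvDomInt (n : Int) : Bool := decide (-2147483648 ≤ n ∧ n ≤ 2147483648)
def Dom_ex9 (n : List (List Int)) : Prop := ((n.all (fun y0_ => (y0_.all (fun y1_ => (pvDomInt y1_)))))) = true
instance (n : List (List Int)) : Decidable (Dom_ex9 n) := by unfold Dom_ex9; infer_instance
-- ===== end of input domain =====

-- B replaces A's per-cell scan of all rows above by one top-to-bottom pass over running
-- column maxima (objective: faster, O(rows*cols) instead of O(rows^2*cols)).

-- ===== PORT A =====
-- the 'for front_row in range(i): if …: append; break' loop appends once iff some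
-- front_row satisfies the test, ported as '.any' over the same range
def ex9 (n : List (List Int)) : List (Int × Int) :=
  let rows : Int := n.length
  let cols : Int := (n.headD []).length
  (PySem.List.pyRange 0 rows 1).foldl (fun result i =>
    (PySem.List.pyRange 0 cols 1).foldl (fun result j =>
      let currentHeight := PySem.List.pyGetD (PySem.List.pyGetD n i []) j 0
      if (PySem.List.pyRange 0 i 1).any (fun frontRow =>
          PySem.List.pyGetD (PySem.List.pyGetD n frontRow []) j 0 > currentHeight)
      then result ++ [(i, j)]
      else result) result) []

-- ===== PORT B =====
-- inner loop of Source B: walks zip(maxes, row) with index j, returning (new_maxes, appended cells)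
def ex9InnerB (i : Int) (j : Int) : List (Int × Int) → List Int × List (Int × Int)
  | [] => ([], [])
  | (m, h) :: rest =>
    let (ms, res) := ex9InnerB i (j + 1) rest
    if m > h then (m :: ms, (i, j) :: res) else (h :: ms, res)

-- outer loop of Source B over rows 1..len(n)-1, threading maxes
def ex9OuterB (i : Int) (maxes : List Int) : List (List Int) → List (Int × Int)
  | [] => []
  | row :: rest =>
    let (ms, res) := ex9InnerB i 0 (maxes.zip row)
    res ++ ex9OuterB (i + 1) ms rest

def ex9_alt (n : List (List Int)) : List (Int × Int) :=
  ex9OuterB 1 (n.headD []) n.tail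

-- ===== PRECONDITION & SPEC =====
-- Pre_ excludes exactly the inputs on which A raises IndexError: the empty list
-- (n[0]) and ragged inputs where some row is shorter than the first row (n[i][j]).
def Pre_ex9 (n : List (List Int)) : Prop :=
  n ≠ [] ∧ ∀ r ∈ n, (n.headD []).length ≤ r.length
instance (n : List (List Int)) : Decidable (Pre_ex9 n) := by unfold Pre_ex9; infer_instance

def pvWitness_ex9 : List (List Int) := [[1, 5], [2, 3], [9, 0]]

def Spec_ex9 (n : List (List Int)) (out : List (Int × Int)) : Prop := out = ex9_alt n
instance (n : List (List Int)) (out : List (Int × Int)) : Decidable (Spec_ex9 n out) := by unfold Spec_ex9; infer_instance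

-- ===== CLAIM (what is proved, stated in full; the proofs are below) =====
def Claim_equal_ex9 : Prop := ∀ (n : List (List Int)), Dom_ex9 n → Pre_ex9 n → Spec_ex9 n (ex9 n)

-- ===== LEMMAS AND PROOFS =====

-- the break-loop test of A at cell (i, j)
def condA (n : List (List Int)) (i j : Int) : Bool :=
  (PySem.List.pyRange 0 i 1).any (fun frontRow =>
    PySem.List.pyGetD (PySem.List.pyGetD n frontRow []) j 0 >
      PySem.List.pyGetD (PySem.List.pyGetD n i []) j 0)

-- A's per-cell contribution, row-major
def contribA (n : List (List Int)) (i : Int) : List (Int × Int) :=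
  ((PySem.List.pyRange 0 ((n.headD []).length : Int) 1).filter (condA n i)).map (fun j => (i, j))

theorem ex9_flat (n : List (List Int)) :
    ex9 n = (PySem.List.pyRange 0 (n.length : Int) 1).flatMap (contribA n) := by
  show (PySem.List.pyRange 0 (n.length : Int) 1).foldl _ [] = _
  have h1 : (fun (result : List (Int × Int)) (i : Int) =>
      (PySem.List.pyRange 0 ((n.headD []).length : Int) 1).foldl (fun result j =>
        if (PySem.List.pyRange 0 i 1).any (fun frontRow =>
            PySem.List.pyGetD (PySem.List.pyGetD n frontRow []) j 0 >
              PySem.List.pyGetD (PySem.List.pyGetD n i []) j 0)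
        then result ++ [(i, j)] else result) result)
      = fun result i => result ++ contribA n i := by
    funext result i
    exact PySem.List.foldl_append_if (condA n i) (fun j => (i, j)) _ _
  rw [h1, PySem.List.foldl_append_eq_flatMap, List.nil_append]

theorem innerB_fst (i : Int) : ∀ (ps : List (Int × Int)) (j : Int),
    (ex9InnerB i j ps).1 = ps.map (fun p => max p.1 p.2) := by
  intro ps
  induction ps with
  | nil => intro j; simp [ex9InnerB]
  | cons p rest ih =>
    intro j
    obtain ⟨m, h⟩ := p
    simp only [ex9InnerB, List.map_cons, ih (j + 1)]
    split_ifs with hmh <;> simp <;> omega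

theorem range_succ_cons (n : Nat) : List.range (n + 1) = 0 :: (List.range n).map (· + 1) := by
  rw [List.range_eq_range', List.range'_succ, List.range'_eq_map_range]
  simp [Nat.add_comm]

theorem innerB_snd (i : Int) : ∀ (ps : List (Int × Int)) (j0 : Int),
    (ex9InnerB i j0 ps).2 =
      ((List.range ps.length).filter (fun t => decide ((ps.getD t (0, 0)).1 > (ps.getD t (0, 0)).2))).map
        (fun t : Nat => (i, j0 + (t : Int))) := by
  intro ps
  induction ps with
  | nil => intro j0; simp [ex9InnerB]
  | cons p rest ih =>
    intro j0
    obtain ⟨m, h⟩ := p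
    have hfun : ∀ l : List Nat, (l.map (· + 1)).map (fun t : Nat => ((i : Int), j0 + (t : Int)))
        = l.map (fun t : Nat => (i, (j0 + 1) + (t : Int))) := by
      intro l; rw [List.map_map]; apply List.map_congr_left; intro t _; simp; ring
    have hp : ∀ t : Nat, ((fun t : Nat => decide ((((m, h) :: rest).getD t (0, 0)).1 >
          (((m, h) :: rest).getD t (0, 0)).2)) ∘ (· + 1)) t
        = (fun t : Nat => decide ((rest.getD t (0, 0)).1 > (rest.getD t (0, 0)).2)) t := by
      intro t; simp
    simp only [ex9InnerB, List.length_cons]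
    rw [range_succ_cons, List.filter_cons, List.filter_map, funext hp]
    simp only [List.getD_cons_zero]
    by_cases hmh : m > h
    · simp [hmh, ih (j0 + 1), hfun]
    · simp [hmh, ih (j0 + 1), hfun]

theorem outerB_eq (n : List (List Int)) :
    ∀ (rs : List (List Int)) (k : Nat) (maxes : List Int),
      n.drop k = rs →
      maxes.length = (n.headD []).length →
      (∀ r ∈ n, (n.headD []).length ≤ r.length) →
      (∀ (j : Nat), j < (n.headD []).length → ∀ h : Int,
          (maxes.getD j 0 > h ↔ ∃ fr : Int, 0 ≤ fr ∧ fr < (k : Int) ∧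
              PySem.List.pyGetD (PySem.List.pyGetD n fr []) (j : Int) 0 > h)) →
      ex9OuterB (k : Int) maxes rs =
        (PySem.List.pyRange (k : Int) (n.length : Int) 1).flatMap (contribA n) := by
  intro rs
  induction rs with
  | nil =>
    intro k maxes hdrop _ _ _
    have hk : n.length ≤ k := by
      by_contra hc
      have := List.drop_eq_nil_iff.mp hdrop
      omega
    rw [PySem.List.pyRange_one_eq_nil (by exact_mod_cast hk)]
    simp [ex9OuterB]
  | cons row rest ih =>
    intro k maxes hdrop hlen hrows hinv
    set cols := (n.headD []).length with hcols
    have hk : k < n.length := by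
      by_contra hc
      rw [List.drop_eq_nil_iff.mpr (by omega)] at hdrop
      simp at hdrop
    have hget : n[k]? = some row := by
      have h0 : (n.drop k)[0]? = some row := by rw [hdrop]; rfl
      simpa [List.getElem?_drop] using h0
    have hgetD : n.getD k [] = row := by simp [List.getD, hget]
    have hmem : row ∈ n := List.mem_of_getElem? hget
    have hrowlen : cols ≤ row.length := hrows row hmem
    have hziplen : (maxes.zip row).length = cols := by
      simp [List.length_zip, hlen]
      omega
    have hzipget : ∀ t : Nat, t < cols →
        (maxes.zip row).getD t (0, 0) = (maxes.getD t 0, row.getD t 0) := by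
      intro t ht
      have h1 : t < (maxes.zip row).length := by omega
      rw [List.getD_eq_getElem _ _ h1, List.getElem_zip,
        List.getD_eq_getElem _ _ (by omega), List.getD_eq_getElem _ _ (by omega)]
    -- the condition A tests at cell (k, t) equals B's running-max comparison
    have hcond : ∀ t : Nat, t < cols →
        condA n (k : Int) (t : Int) = decide (maxes.getD t 0 > row.getD t 0) := by
      intro t ht
      have : (condA n (k : Int) (t : Int) = true) ↔
          (decide (maxes.getD t 0 > row.getD t 0) = true) := by
        simp only [condA, List.any_eq_true, PySem.List.mem_pyRange_one, decide_eq_true_eq,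
          PySem.List.pyGetD_natCast, hgetD]
        rw [hinv t ht (row.getD t 0)]
        constructor
        · rintro ⟨fr, ⟨hfr0, hfrk⟩, hgt⟩
          exact ⟨fr, hfr0, hfrk, by simpa using hgt⟩
        · rintro ⟨fr, hfr0, hfrk, hgt⟩
          exact ⟨fr, ⟨hfr0, hfrk⟩, by simpa using hgt⟩
      exact Bool.coe_iff_coe.mp this
    simp only [ex9OuterB]
    have hres : (ex9InnerB (k : Int) 0 (maxes.zip row)).2 = contribA n (k : Int) := by
      rw [innerB_snd, contribA, hziplen]
      rw [show PySem.List.pyRange 0 (cols : Int) 1 = (List.range cols).map (fun t : Nat => ((t : Nat) : Int)) by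
        rw [PySem.List.pyRange_one]
        simp]
      rw [List.filter_map, List.map_map]
      congr 1
      · funext t
        simp
      · apply List.filter_congr
        intro t htmem
        have ht : t < cols := List.mem_range.mp htmem
        simp only [Function.comp_apply, hzipget t ht, hcond t ht]
    have hms1 : (ex9InnerB (k : Int) 0 (maxes.zip row)).1 =
        (maxes.zip row).map (fun p => max p.1 p.2) := innerB_fst _ _ _
    have hmslen : ((maxes.zip row).map (fun p => max p.1 p.2)).length = cols := by
      simp [hziplen]
    have hmsget : ∀ j : Nat, j < cols →
        ((maxes.zip row).map (fun p => max p.1 p.2)).getD j 0 =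
          max (maxes.getD j 0) (row.getD j 0) := by
      intro j hj
      rw [List.getD_eq_getElem _ _ (by rw [hmslen]; omega), List.getElem_map, List.getElem_zip,
        List.getD_eq_getElem _ _ (by omega), List.getD_eq_getElem _ _ (by omega)]
    have hinv' : ∀ (j : Nat), j < cols → ∀ h : Int,
        (((maxes.zip row).map (fun p => max p.1 p.2)).getD j 0 > h ↔
          ∃ fr : Int, 0 ≤ fr ∧ fr < ((k + 1 : Nat) : Int) ∧
            PySem.List.pyGetD (PySem.List.pyGetD n fr []) (j : Int) 0 > h) := by
      intro j hj h
      rw [hmsget j hj]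
      push_cast
      constructor
      · intro hgt
        rcases lt_max_iff.mp hgt with hgt | hgt
        · obtain ⟨fr, hfr0, hfrk, hfr⟩ := (hinv j hj h).mp hgt
          exact ⟨fr, hfr0, by omega, hfr⟩
        · refine ⟨(k : Int), by omega, by omega, ?_⟩
          simpa [List.getD, hget] using hgt
      · rintro ⟨fr, hfr0, hfrk, hgt⟩
        by_cases hfr : fr = (k : Int)
        · subst hfr
          simp only [PySem.List.pyGetD_natCast, List.getD, hget, Option.getD_some] at hgt
          exact lt_max_iff.mpr (Or.inr hgt)
        · have : fr < (k : Int) := by omega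
          exact lt_max_iff.mpr (Or.inl ((hinv j hj h).mpr ⟨fr, hfr0, this, hgt⟩))
    have hdrop' : n.drop (k + 1) = rest := by
      have : n.drop (k + 1) = (n.drop k).drop 1 := by
        rw [List.drop_drop]
      rw [this, hdrop, List.drop_one, List.tail_cons]
    have hrec := ih (k + 1) ((maxes.zip row).map (fun p => max p.1 p.2)) hdrop' hmslen hrows hinv'
    rw [hres, hms1, PySem.List.pyRange_one_cons (by exact_mod_cast hk), List.flatMap_cons]
    have hcast : ((k : Int) + 1) = ((k + 1 : Nat) : Int) := by push_cast; ring
    rw [hcast, hrec]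

theorem ex9_spec : Claim_equal_ex9 := by
  intro n _ hpre
  obtain ⟨hne, hrows⟩ := hpre
  rcases n with _ | ⟨r0, rest⟩
  · exact absurd rfl hne
  show ex9 (r0 :: rest) = ex9_alt (r0 :: rest)
  rw [ex9_flat, ex9_alt]
  have h0 : (0 : Int) < ((r0 :: rest).length : Int) := by simp
  rw [PySem.List.pyRange_one_cons h0, List.flatMap_cons]
  have hc0 : contribA (r0 :: rest) 0 = [] := by
    have : ∀ j, condA (r0 :: rest) 0 j = false := by
      intro j
      simp [condA, PySem.List.pyRange_one_eq_nil (le_refl 0)]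
    simp [contribA, this]
  rw [hc0, List.nil_append]
  have := outerB_eq (r0 :: rest) rest 1 r0 (by simp) (by simp) hrows ?_
  · simpa using this.symm
  · intro j hj h
    constructor
    · intro hgt
      exact ⟨0, le_refl 0, by norm_num, by simpa using hgt⟩
    · rintro ⟨fr, hfr0, hfr1, hgt⟩
      have : fr = 0 := by omega
      subst this
      simpa using hgt
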